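-- pv_equiv track=rewrite | github.com/waldfalke/rus-100 | project-starter/Examples/contracts/tests/static/consistency/test_contract_consistency.py | _find_contradictions_in_conditions
-- ===== SOURCE A (Python) =====
-- def _find_contradictions_in_conditions(conditions):
--     """
--     Находит противоречия в списке условий.
--
--     Args:
--         conditions: Список условий
--
--     Returns:
--         Список найденных противоречий
--     """
--     contradictions = []
--
--     # Простые противоречия
--     for i in range(len(conditions)):
--         for j in range(i + 1, len(conditions)):
--             cond1 = conditions[i]
--             cond2 = conditions[j]
--
--             # Проверяем противоречия типа "x > 0" и "x <= 0"
--             if ">" in cond1 and "<=" in cond2 and cond1.split(">")[0].strip() == cond2.split("<=")[0].strip():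
--                 contradictions.append(f"Противоречие: '{cond1}' и '{cond2}'")
--
--             # Проверяем противоречия типа "x < 0" и "x >= 0"
--             if "<" in cond1 and ">=" in cond2 and cond1.split("<")[0].strip() == cond2.split(">=")[0].strip():
--                 contradictions.append(f"Противоречие: '{cond1}' и '{cond2}'")
--
--             # Проверяем противоречия типа "x == 0" и "x != 0"
--             if "==" in cond1 and "!=" in cond2 and cond1.split("==")[0].strip() == cond2.split("!=")[0].strip():
--                 contradictions.append(f"Противоречие: '{cond1}' и '{cond2}'")
--
--     return contradictions
-- ===== SOURCE B (Python) =====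
-- def _find_contradictions_in_conditions(conditions):
--     RULES = ((">", "<="), ("<", ">="), ("==", "!="))
--     triples = []
--     for r, (op1, op2) in enumerate(RULES):
--         pairs = [(c.split(op2)[0].strip(), j) for j, c in enumerate(conditions) if op2 in c]
--         right = {}
--         for k, j in pairs:
--             right[k] = right.get(k, []) + [j]
--         for i, c in enumerate(conditions):
--             if op1 in c:
--                 for j in right.get(c.split(op1)[0].strip(), ()):
--                     if j > i:
--                         triples.append((i, j, r))
--     triples.sort()
--     return ["Противоречие: '%s' и '%s'" % (conditions[i], conditions[j]) for i, j, _ in triples]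
-- ===== Notes on version B (the rewrite author's own statement) =====
-- stated objective: faster
-- what changed: Replaces A's all-pairs double loop (each pair tested against the three operator rules) by, per rule, a dict indexing right-hand conditions by their stripped left-hand side so partners are found by lookup, then one sort of the collected (i, j, rule) triples restores A's output order.
import Mathlib
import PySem

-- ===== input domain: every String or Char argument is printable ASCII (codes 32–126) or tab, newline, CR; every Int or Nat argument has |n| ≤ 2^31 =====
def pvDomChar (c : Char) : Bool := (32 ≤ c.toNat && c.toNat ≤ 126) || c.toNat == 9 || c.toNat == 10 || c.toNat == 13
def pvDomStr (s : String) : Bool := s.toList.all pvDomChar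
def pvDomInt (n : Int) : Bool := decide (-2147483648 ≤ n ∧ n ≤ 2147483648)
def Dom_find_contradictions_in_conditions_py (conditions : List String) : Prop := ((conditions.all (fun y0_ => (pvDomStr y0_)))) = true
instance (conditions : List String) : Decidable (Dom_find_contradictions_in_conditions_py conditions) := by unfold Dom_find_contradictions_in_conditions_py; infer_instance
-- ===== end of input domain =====

-- B replaces A's quadratic all-pairs scan by, per operator pair, a dict keyed on the left-hand side
-- (so matching indices are found by lookup, not by an inner scan) followed by one sort of the hits.

-- ===== PORT A =====
-- shared literal subexpressions of BOTH Pythons: the f-string and c.split(op)[0].strip()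
def pvFmt (c1 c2 : String) : String := "Противоречие: '" ++ c1 ++ "' и '" ++ c2 ++ "'"
def pvKey (c op : String) : String := PySem.Str.strip (((PySem.Str.split? c op).getD []).headD "")  -- c.split(op)[0].strip(); split? is none only for op = "" (never here)

def find_contradictions_in_conditions_py (conditions : List String) : List String :=
  (PySem.List.pyRange 0 (conditions.length : Int)).foldl (fun contradictions i =>
    (PySem.List.pyRange (i + 1) (conditions.length : Int)).foldl (fun contradictions j =>
      let cond1 := PySem.List.pyGetD conditions i ""
      let cond2 := PySem.List.pyGetD conditions j ""
      let contradictions :=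
        if PySem.Str.isIn ">" cond1 && PySem.Str.isIn "<=" cond2 && (pvKey cond1 ">" == pvKey cond2 "<=")
        then contradictions ++ [pvFmt cond1 cond2] else contradictions
      let contradictions :=
        if PySem.Str.isIn "<" cond1 && PySem.Str.isIn ">=" cond2 && (pvKey cond1 "<" == pvKey cond2 ">=")
        then contradictions ++ [pvFmt cond1 cond2] else contradictions
      let contradictions :=
        if PySem.Str.isIn "==" cond1 && PySem.Str.isIn "!=" cond2 && (pvKey cond1 "==" == pvKey cond2 "!=")
        then contradictions ++ [pvFmt cond1 cond2] else contradictions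
      contradictions) contradictions) []

-- ===== PORT B =====
def find_contradictions_in_conditions_py_alt (conditions : List String) : List String :=
  let rules : List (Int × String × String) := [(0, ">", "<="), (1, "<", ">="), (2, "==", "!=")]
  let triples : List (Int × Int × Int) := rules.foldl (fun triples rule =>
    let r := rule.1
    let op1 := rule.2.1
    let op2 := rule.2.2
    let pairs := (PySem.List.enumerate conditions).foldl (fun acc jc =>
      if PySem.Str.isIn op2 jc.2 then acc ++ [(pvKey jc.2 op2, jc.1)] else acc) []
    let right := pairs.foldl (fun d kj => d.modify kj.1 [] (fun v => v ++ [kj.2]))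
      (PySem.Dict.empty : PySem.Dict String (List Int))
    (PySem.List.enumerate conditions).foldl (fun triples ic =>
      if PySem.Str.isIn op1 ic.2 then
        (right.getD (pvKey ic.2 op1) []).foldl (fun triples j =>
          if ic.1 < j then triples ++ [(ic.1, j, r)] else triples) triples
      else triples) triples) []
  (PySem.List.sorted triples (fun t => toLex (t.1, toLex (t.2.1, t.2.2)))).map
    (fun t => pvFmt (PySem.List.pyGetD conditions t.1 "") (PySem.List.pyGetD conditions t.2.1 ""))

-- ===== PRECONDITION & SPEC =====
def Spec_find_contradictions_in_conditions_py (conditions : List String) (out : List String) : Prop := out = find_contradictions_in_conditions_py_alt conditions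
instance (conditions : List String) (out : List String) : Decidable (Spec_find_contradictions_in_conditions_py conditions out) := by unfold Spec_find_contradictions_in_conditions_py; infer_instance

-- ===== CLAIM (what is proved, stated in full; the proofs are below) =====
def Claim_equal_find_contradictions_in_conditions_py : Prop := ∀ (conditions : List String), Dom_find_contradictions_in_conditions_py conditions → Spec_find_contradictions_in_conditions_py conditions (find_contradictions_in_conditions_py conditions)

-- ===== LEMMAS AND PROOFS =====

def pvOp1 (r : Int) : String := if r == 0 then ">" else if r == 1 then "<" else "=="
def pvOp2 (r : Int) : String := if r == 0 then "<=" else if r == 1 then ">=" else "!="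

def pvC (conds : List String) (i : Int) : String := PySem.List.pyGetD conds i ""

/-- does condition pair (i, j) trigger the rule with operators (op1, op2)? -/
def pvMg (conds : List String) (op1 op2 : String) (i j : Int) : Bool :=
  PySem.Str.isIn op1 (pvC conds i) && PySem.Str.isIn op2 (pvC conds j) &&
    (pvKey (pvC conds i) op1 == pvKey (pvC conds j) op2)

def pvM (conds : List String) (i j r : Int) : Bool := pvMg conds (pvOp1 r) (pvOp2 r) i j

def pvP (conds : List String) (t : Int × Int × Int) : Bool :=
  decide (t.1 < t.2.1) && pvM conds t.1 t.2.1 t.2.2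

def pvKeyL (t : Int × Int × Int) : Lex (Int × Lex (Int × Int)) := toLex (t.1, toLex (t.2.1, t.2.2))

def pvFmtT (conds : List String) (t : Int × Int × Int) : String := pvFmt (pvC conds t.1) (pvC conds t.2.1)

def pvCubeIJR (conds : List String) : List (Int × Int × Int) :=
  (PySem.List.pyRange 0 (conds.length : Int)).flatMap (fun i =>
    (PySem.List.pyRange 0 (conds.length : Int)).flatMap (fun j =>
      ([0, 1, 2] : List Int).map (fun r => (i, j, r))))

def pvCubeRIJ (conds : List String) : List (Int × Int × Int) :=
  ([0, 1, 2] : List Int).flatMap (fun r =>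
    (PySem.List.pyRange 0 (conds.length : Int)).flatMap (fun i =>
      (PySem.List.pyRange 0 (conds.length : Int)).map (fun j => (i, j, r))))

def pvT (conds : List String) : List (Int × Int × Int) := (pvCubeIJR conds).filter (pvP conds)

-- small generic loop-shape lemmas
theorem pv_flatMap_guard {β : Type} (l : List Int) (p : Int → Bool) (g : Int → List β) :
    l.flatMap (fun j => if p j then g j else []) = (l.filter p).flatMap g := by
  induction l with
  | nil => simp
  | cons a t ih => by_cases h : p a <;> simp [h, ih]

theorem pv_empty_pyRange (a b : Int) (h : b ≤ a) : PySem.List.pyRange a b = [] := by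
  rw [PySem.List.pyRange_one]
  have : (b - a).toNat = 0 := by omega
  simp [this]

theorem pv_filter_lt_pyRange (i : Int) (n : Nat) (hi : 0 ≤ i) :
    (PySem.List.pyRange 0 (n : Int)).filter (fun j => decide (i < j)) = PySem.List.pyRange (i + 1) (n : Int) := by
  induction n with
  | zero =>
      rw [pv_empty_pyRange 0 ((0 : Nat) : Int) (by omega), pv_empty_pyRange (i + 1) ((0 : Nat) : Int) (by omega)]
      rfl
  | succ m ih =>
      have hcast : ((m + 1 : Nat) : Int) = (m : Int) + 1 := by push_cast; ring
      rw [hcast, PySem.List.pyRange_one_succ_right (by positivity : (0 : Int) ≤ (m : Int)), List.filter_append]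
      by_cases him : i < (m : Int)
      · rw [PySem.List.pyRange_one_succ_right (by omega : i + 1 ≤ (m : Int))]
        simp [ih, him]
      · rw [pv_empty_pyRange (i + 1) ((m : Int) + 1) (by omega),
          pv_empty_pyRange (i + 1) (m : Int) (by omega) ] at *
        simp [ih, him]

theorem pv_flatMap_congr {α β : Type} (l : List α) (f g : α → List β)
    (h : ∀ a ∈ l, f a = g a) : l.flatMap f = l.flatMap g := by
  induction l with
  | nil => rfl
  | cons a t ih =>
      simp only [List.flatMap_cons, h a (List.mem_cons_self), ih (fun b hb => h b (List.mem_cons_of_mem a hb))]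

def pvGA (conds : List String) (i j : Int) : List String :=
  (([0, 1, 2] : List Int).filter (fun r => pvM conds i j r)).map (fun r => pvFmtT conds (i, j, r))

-- A-side characterisation
theorem pvA_eq (conds : List String) :
    find_contradictions_in_conditions_py conds = (pvT conds).map (pvFmtT conds) := by
  have hAform : find_contradictions_in_conditions_py conds
      = (PySem.List.pyRange 0 (conds.length : Int)).flatMap (fun i =>
          (PySem.List.pyRange (i + 1) (conds.length : Int)).flatMap (fun j => pvGA conds i j)) := by
    unfold find_contradictions_in_conditions_py
    have hbody : ∀ i : Int,
        (fun (contradictions : List String) (j : Int) =>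
          let cond1 := PySem.List.pyGetD conds i ""
          let cond2 := PySem.List.pyGetD conds j ""
          let contradictions :=
            if PySem.Str.isIn ">" cond1 && PySem.Str.isIn "<=" cond2 && (pvKey cond1 ">" == pvKey cond2 "<=")
            then contradictions ++ [pvFmt cond1 cond2] else contradictions
          let contradictions :=
            if PySem.Str.isIn "<" cond1 && PySem.Str.isIn ">=" cond2 && (pvKey cond1 "<" == pvKey cond2 ">=")
            then contradictions ++ [pvFmt cond1 cond2] else contradictions
          let contradictions :=
            if PySem.Str.isIn "==" cond1 && PySem.Str.isIn "!=" cond2 && (pvKey cond1 "==" == pvKey cond2 "!=")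
            then contradictions ++ [pvFmt cond1 cond2] else contradictions
          contradictions)
        = fun acc j => acc ++ pvGA conds i j := by
      intro i; funext acc j
      show (let a1 := if pvM conds i j 0 then acc ++ [pvFmtT conds (i, j, 0)] else acc
            let a2 := if pvM conds i j 1 then a1 ++ [pvFmtT conds (i, j, 1)] else a1
            if pvM conds i j 2 then a2 ++ [pvFmtT conds (i, j, 2)] else a2) = acc ++ pvGA conds i j
      cases h0 : pvM conds i j 0 <;> cases h1 : pvM conds i j 1 <;> cases h2 : pvM conds i j 2 <;>
        simp [pvGA, h0, h1, h2, List.filter]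
    simp only [hbody]
    have h2 : ∀ (i : Int) (acc : List String),
        (PySem.List.pyRange (i + 1) (conds.length : Int)).foldl (fun acc j => acc ++ pvGA conds i j) acc
          = acc ++ (PySem.List.pyRange (i + 1) (conds.length : Int)).flatMap (fun j => pvGA conds i j) :=
      fun i acc => PySem.List.foldl_append_eq_flatMap _ _ _
    simp only [h2]
    rw [PySem.List.foldl_append_eq_flatMap]
    simp
  rw [hAform]
  unfold pvT pvCubeIJR
  rw [List.filter_flatMap, List.map_flatMap]
  refine (pv_flatMap_congr _ _ _ ?_).symm
  intro i hi
  have hi0 : 0 ≤ i := (PySem.List.mem_pyRange_one.mp hi).1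
  rw [List.filter_flatMap, List.map_flatMap]
  have hj : ∀ j : Int,
      ((([0, 1, 2] : List Int).map (fun r => (i, j, r))).filter (pvP conds)).map (pvFmtT conds)
        = if decide (i < j) then pvGA conds i j else [] := by
    intro j
    cases h : decide (i < j) with
    | false => simp [pvP, List.filter, List.map, h]
    | true =>
        rw [List.filter_map, List.map_map]
        simp only [pvGA, Function.comp_def]
        congr 1
        apply List.filter_congr
        intro r _
        simp [pvP, h]
  calc (PySem.List.pyRange 0 (conds.length : Int)).flatMap
        (fun j => ((([0, 1, 2] : List Int).map (fun r => (i, j, r))).filter (pvP conds)).map (pvFmtT conds))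
      = (PySem.List.pyRange 0 (conds.length : Int)).flatMap (fun j => if decide (i < j) then pvGA conds i j else []) :=
        pv_flatMap_congr _ _ _ (fun j _ => hj j)
    _ = ((PySem.List.pyRange 0 (conds.length : Int)).filter (fun j => decide (i < j))).flatMap (fun j => pvGA conds i j) :=
        pv_flatMap_guard _ _ _
    _ = (PySem.List.pyRange (i + 1) (conds.length : Int)).flatMap (fun j => pvGA conds i j) := by
        rw [pv_filter_lt_pyRange i conds.length hi0]

-- B-side characterisation
theorem pv_flatMap_map {α β γ : Type} (l : List α) (f : α → β) (g : β → List γ) :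
    (l.map f).flatMap g = l.flatMap (fun x => g (f x)) := by
  induction l with
  | nil => rfl
  | cons a t ih => simp only [List.map_cons, List.flatMap_cons, ih]

set_option maxHeartbeats 1600000 in
theorem pv_rule_step (conds : List String) (op1 op2 : String) (r : Int)
    (tr : List (Int × Int × Int)) :
    List.foldl
      (fun triples ic =>
        if PySem.Str.isIn op1 ic.2 = true then
          List.foldl (fun triples j => if ic.1 < j then triples ++ [(ic.1, j, r)] else triples) triples
            ((List.foldl (fun d kj => d.modify kj.1 [] fun v => v ++ [kj.2]) PySem.Dict.empty
                  (List.foldl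
                    (fun acc jc =>
                      if PySem.Str.isIn op2 jc.2 = true then acc ++ [(pvKey jc.2 op2, jc.1)] else acc)
                    [] (PySem.List.enumerate conds))).getD
              (pvKey ic.2 op1) [])
        else triples)
      tr (PySem.List.enumerate conds)
    = tr ++ (PySem.List.pyRange 0 (conds.length : Int)).flatMap (fun i =>
        ((PySem.List.pyRange 0 (conds.length : Int)).filter
          (fun j => decide (i < j) && pvMg conds op1 op2 i j)).map (fun j => (i, j, r))) := by
  have hin : ∀ (i0 : Int) (jl : List Int) (tr0 : List (Int × Int × Int)),
      List.foldl (fun triples j => if i0 < j then triples ++ [(i0, j, r)] else triples) tr0 jl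
        = tr0 ++ (jl.filter (fun j => decide (i0 < j))).map (fun j => (i0, j, r)) := by
    intro i0 jl tr0
    have hfun : (fun (triples : List (Int × Int × Int)) (j : Int) =>
        if i0 < j then triples ++ [(i0, j, r)] else triples)
        = (fun triples j => if (fun j => decide (i0 < j)) j = true
            then triples ++ [(fun j => (i0, j, r)) j] else triples) := by
      funext tr1 j; by_cases h : i0 < j <;> simp [h]
    rw [hfun, PySem.List.foldl_append_if]
  have hget : ∀ c : String,
      ((List.foldl (fun d kj => d.modify kj.1 [] fun v => v ++ [kj.2]) PySem.Dict.empty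
          (List.foldl
            (fun acc jc =>
              if PySem.Str.isIn op2 jc.2 = true then acc ++ [(pvKey jc.2 op2, jc.1)] else acc)
            [] (PySem.List.enumerate conds))).getD c [])
        = (PySem.List.pyRange 0 (conds.length : Int)).filter
            (fun j => (pvKey (pvC conds j) op2 == c) && PySem.Str.isIn op2 (pvC conds j)) := by
    intro c
    rw [PySem.List.foldl_append_if, PySem.Dict.getD_foldl_modify_append, PySem.Dict.getD_empty]
    rw [List.nil_append, List.nil_append, List.filter_map, List.map_map]
    rw [PySem.List.enumerate_eq_map_pyRange conds "", List.filter_filter, List.filter_map, List.map_map]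
    have hlen : PySem.List.len conds = (conds.length : Int) := by
      simp [PySem.List.len]
    rw [hlen]
    simp [Function.comp_def, pvC]
  have hout : (fun (triples : List (Int × Int × Int)) (ic : Int × String) =>
      if PySem.Str.isIn op1 ic.2 = true then
        List.foldl (fun triples j => if ic.1 < j then triples ++ [(ic.1, j, r)] else triples) triples
          ((List.foldl (fun d kj => d.modify kj.1 [] fun v => v ++ [kj.2]) PySem.Dict.empty
                (List.foldl
                  (fun acc jc =>
                    if PySem.Str.isIn op2 jc.2 = true then acc ++ [(pvKey jc.2 op2, jc.1)] else acc)
                  [] (PySem.List.enumerate conds))).getD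
            (pvKey ic.2 op1) [])
      else triples)
      = fun triples ic => triples ++ (if PySem.Str.isIn op1 ic.2 = true then
          (((PySem.List.pyRange 0 (conds.length : Int)).filter
              (fun j => (pvKey (pvC conds j) op2 == pvKey ic.2 op1) && PySem.Str.isIn op2 (pvC conds j))).filter
            (fun j => decide (ic.1 < j))).map (fun j => (ic.1, j, r)) else []) := by
    funext tr1 ic
    by_cases hb : PySem.Str.isIn op1 ic.2 = true
    · rw [if_pos hb, if_pos hb, hget (pvKey ic.2 op1), hin]
    · rw [if_neg hb, if_neg hb, List.append_nil]
  rw [hout, PySem.List.foldl_append_eq_flatMap]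
  congr 1
  rw [PySem.List.enumerate_eq_map_pyRange conds "", pv_flatMap_map]
  have hlen : PySem.List.len conds = (conds.length : Int) := by
    simp [PySem.List.len]
  rw [hlen]
  apply pv_flatMap_congr
  intro i _
  by_cases hb : PySem.Str.isIn op1 (pvC conds i) = true
  · have hb' : PySem.Str.isIn op1 (i, PySem.List.pyGetD conds i "").2 = true := hb
    rw [if_pos hb', List.filter_filter]
    congr 1
    apply List.filter_congr
    intro j _
    show (decide (i < j) && ((pvKey (pvC conds j) op2 == pvKey (pvC conds i) op1)
        && PySem.Str.isIn op2 (pvC conds j))) = (decide (i < j) && pvMg conds op1 op2 i j)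
    cases h : decide (i < j)
    · simp
    · simp only [Bool.true_and]
      rw [Bool.eq_iff_iff]
      simp only [pvMg, Bool.and_eq_true, beq_iff_eq]
      constructor
      · rintro ⟨h1, h2⟩; exact ⟨⟨hb, h2⟩, h1.symm⟩
      · rintro ⟨⟨_, h2⟩, h1⟩; exact ⟨h1.symm, h2⟩
  · have hb' : ¬ PySem.Str.isIn op1 (i, PySem.List.pyGetD conds i "").2 = true := hb
    rw [if_neg hb']
    have : ∀ j : Int, (decide (i < j) && pvMg conds op1 op2 i j) = false := by
      intro j
      simp only [Bool.not_eq_true] at hb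
      simp only [pvMg, hb, Bool.false_and, Bool.and_false]
    simp [this]

theorem pv_cube_row (conds : List String) (op1 op2 : String) (r : Int)
    (h1 : pvOp1 r = op1) (h2 : pvOp2 r = op2) :
    ((PySem.List.pyRange 0 (conds.length : Int)).flatMap (fun i =>
        (PySem.List.pyRange 0 (conds.length : Int)).map (fun j => (i, j, r)))).filter (pvP conds)
      = (PySem.List.pyRange 0 (conds.length : Int)).flatMap (fun i =>
          ((PySem.List.pyRange 0 (conds.length : Int)).filter
            (fun j => decide (i < j) && pvMg conds op1 op2 i j)).map (fun j => (i, j, r))) := by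
  subst h1; subst h2
  rw [List.filter_flatMap]
  apply pv_flatMap_congr
  intro i _
  rw [List.filter_map]
  congr 1

set_option maxHeartbeats 1600000 in
theorem pvB_eq (conds : List String) :
    find_contradictions_in_conditions_py_alt conds
      = (PySem.List.sorted ((pvCubeRIJ conds).filter (pvP conds)) pvKeyL).map (pvFmtT conds) := by
  unfold find_contradictions_in_conditions_py_alt
  simp only [List.foldl_cons, List.foldl_nil]
  rw [pv_rule_step conds ">" "<=" 0, pv_rule_step conds "<" ">=" 1, pv_rule_step conds "==" "!=" 2]
  have hcube : (pvCubeRIJ conds).filter (pvP conds)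
      = ((([] : List (Int × Int × Int))
          ++ (PySem.List.pyRange 0 (conds.length : Int)).flatMap (fun i =>
              ((PySem.List.pyRange 0 (conds.length : Int)).filter
                (fun j => decide (i < j) && pvMg conds ">" "<=" i j)).map (fun j => (i, j, 0))))
          ++ (PySem.List.pyRange 0 (conds.length : Int)).flatMap (fun i =>
              ((PySem.List.pyRange 0 (conds.length : Int)).filter
                (fun j => decide (i < j) && pvMg conds "<" ">=" i j)).map (fun j => (i, j, 1))))
          ++ (PySem.List.pyRange 0 (conds.length : Int)).flatMap (fun i =>
              ((PySem.List.pyRange 0 (conds.length : Int)).filter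
                (fun j => decide (i < j) && pvMg conds "==" "!=" i j)).map (fun j => (i, j, 2))) := by
    unfold pvCubeRIJ
    rw [List.filter_flatMap]
    simp only [List.flatMap_cons, List.flatMap_nil, List.append_nil]
    rw [pv_cube_row conds ">" "<=" 0 rfl rfl, pv_cube_row conds "<" ">=" 1 rfl rfl,
      pv_cube_row conds "==" "!=" 2 rfl rfl]
    simp [List.append_assoc]
  rw [hcube]
  rfl

theorem pv_perm (conds : List String) :
    (pvT conds).Perm ((pvCubeRIJ conds).filter (pvP conds)) := by
  unfold pvT
  apply List.Perm.filter
  apply Multiset.coe_eq_coe.mp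
  unfold pvCubeIJR pvCubeRIJ
  simp only [← Multiset.coe_bind, ← Multiset.map_coe]
  simp only [← Multiset.bind_singleton]
  trans ((PySem.List.pyRange 0 (conds.length : Int) : Multiset Int).bind fun i =>
      (([0, 1, 2] : List Int) : Multiset Int).bind fun r =>
        (PySem.List.pyRange 0 (conds.length : Int) : Multiset Int).bind fun j =>
          ({(i, j, r)} : Multiset (Int × Int × Int)))
  · exact Multiset.bind_congr (fun i _ => Multiset.bind_bind _ _)
  · exact Multiset.bind_bind _ _

theorem pv_cube_pairwise (conds : List String) :
    (pvCubeIJR conds).Pairwise (fun a b => pvKeyL a < pvKeyL b) := by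
  unfold pvCubeIJR
  rw [List.pairwise_flatMap]
  constructor
  · intro i _
    rw [List.pairwise_flatMap]
    constructor
    · intro j _
      rw [List.pairwise_map]
      simp [List.pairwise_cons, pvKeyL, Prod.Lex.lt_iff]
    · refine (PySem.List.pairwise_lt_pyRange_one 0 ((conds.length : Int))).imp fun {j j'} hjj => ?_
      intro x hx y hy
      simp only [List.mem_map] at hx hy
      obtain ⟨r, _, rfl⟩ := hx
      obtain ⟨r', _, rfl⟩ := hy
      simp [pvKeyL, Prod.Lex.lt_iff, hjj]
  · refine (PySem.List.pairwise_lt_pyRange_one 0 ((conds.length : Int))).imp fun {i i'} hii => ?_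
    intro x hx y hy
    simp only [List.mem_flatMap, List.mem_map] at hx hy
    obtain ⟨j, _, r, _, rfl⟩ := hx
    obtain ⟨j', _, r', _, rfl⟩ := hy
    simp [pvKeyL, Prod.Lex.lt_iff, hii]

theorem pv_pairwise (conds : List String) :
    (pvT conds).Pairwise (fun a b => pvKeyL a < pvKeyL b) := by
  unfold pvT
  exact (pv_cube_pairwise conds).filter _

-- ===== VERDICT (by name: the statement is the Claim_ definition above) =====
theorem find_contradictions_in_conditions_py_spec : Claim_equal_find_contradictions_in_conditions_py := by
  intro conds _
  show _ = _
  rw [pvA_eq, pvB_eq,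
    PySem.List.sorted_eq_of_perm_of_pairwise_lt _ (pvT conds) pvKeyL (pv_perm conds) (pv_pairwise conds)]
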